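-- pv_equiv track=rewrite | github.com/apocas/restai | restai/routers/image_generators.py | _mask_options
-- ===== SOURCE A (Python) =====
-- from typing import Optional
--
-- _SENSITIVE_OPT_KEYS = {"api_key", "key", "password", "secret"}
--
-- def _mask_options(options: Optional[dict]) -> Optional[dict]:
--     """Replace sensitive fields with the `"********"` sentinel before
--     serializing to the client. Same set the encrypt helpers use."""
--     if not options:
--         return options
--     try:
--         masked = dict(options)
--         for k in _SENSITIVE_OPT_KEYS:
--             if k in masked and masked[k]:
--                 masked[k] = "********"
--         return masked
--     except Exception:
--         return options
-- ===== SOURCE B (Python) =====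
-- from typing import Optional
--
-- _SENSITIVE_OPT_KEYS = {"api_key", "key", "password", "secret"}
--
-- def _mask_options(options: Optional[dict]) -> Optional[dict]:
--     if not options:
--         return options
--     try:
--         out = {}
--         for k, v in options.items():
--             out[k] = "********" if k in _SENSITIVE_OPT_KEYS and v else v
--         return out
--     except Exception:
--         return options
-- ===== Notes on version B (the rewrite author's own statement) =====
-- stated objective: simpler
-- what changed: A copies the dict and loops over the 4 sensitive keys, probing and mutating the copy in place; B makes one pass over the data itself, building a fresh dict entry by entry with the sensitive-set probe per entry.
import Mathlib
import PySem

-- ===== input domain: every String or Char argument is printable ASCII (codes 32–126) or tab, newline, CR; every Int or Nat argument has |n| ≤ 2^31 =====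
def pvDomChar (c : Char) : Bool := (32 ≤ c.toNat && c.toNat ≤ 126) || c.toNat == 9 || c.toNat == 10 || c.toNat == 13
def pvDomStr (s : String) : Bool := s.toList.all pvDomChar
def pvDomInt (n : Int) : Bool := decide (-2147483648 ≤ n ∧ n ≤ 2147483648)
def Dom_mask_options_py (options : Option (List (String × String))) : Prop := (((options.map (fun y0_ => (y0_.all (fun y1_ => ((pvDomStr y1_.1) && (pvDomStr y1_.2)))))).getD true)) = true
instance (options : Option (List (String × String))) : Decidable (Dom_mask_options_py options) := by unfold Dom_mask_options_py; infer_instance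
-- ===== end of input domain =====

-- B builds a fresh dict in one pass over the data (probing the sensitive set per entry) instead of
-- A's loop over the 4 sensitive keys mutating a copy in place (objective: simpler).

-- ===== PORT A =====
-- _SENSITIVE_OPT_KEYS (a 4-element set literal; A's loop over it is order-independent,
-- so a fixed enumeration of the set's elements is exact)
def pvSensKeys : List String := ["api_key", "key", "password", "secret"]

-- loop body: `if k in masked and masked[k]: masked[k] = "********"` (string truthiness: ≠ "")
def pvMaskStep (d : PySem.Dict String String) (k : String) : PySem.Dict String String :=
  match d.get? k with
  | some v => if v ≠ "" then d.insert k "********" else d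
  | none => d

def mask_options_py (options : Option (List (String × String))) : Option (List (String × String)) :=
  match options with
  | none => none                         -- `if not options: return options`
  | some l =>
    if l.isEmpty then some l             -- empty dict is falsy
    else
      -- try: masked = dict(options) — a copy of the dict, cannot raise; for k in _SENSITIVE_OPT_KEYS: …
      let masked := PySem.Dict.mk l
      some (pvSensKeys.foldl pvMaskStep masked).items

-- ===== PORT B =====
-- loop body: `out[k] = "********" if k in _SENSITIVE_OPT_KEYS and v else v`, building `out` from empty
def mask_options_py_alt (options : Option (List (String × String))) : Option (List (String × String)) :=
  match options with
  | none => none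
  | some l =>
    if l.isEmpty then some l
    else
      let out := l.foldl
        (fun d p => d.insert p.1 (if p.1 ∈ pvSensKeys ∧ p.2 ≠ "" then "********" else p.2))
        PySem.Dict.empty
      some out.items

-- ===== PRECONDITION & SPEC =====
-- Pre_ excludes association lists with duplicate keys: they do not represent a Python dict
-- (the `options` parameter is a dict, whose keys are necessarily distinct), so Python A never
-- receives them; no Python input is excluded.
def Pre_mask_options_py (options : Option (List (String × String))) : Prop :=
  ((options.getD []).map Prod.fst).Nodup
instance (options : Option (List (String × String))) : Decidable (Pre_mask_options_py options) := by unfold Pre_mask_options_py; infer_instance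

def pvWitness_mask_options_py : (Option (List (String × String))) :=
  some [("key", "abc"), ("temperature", "0.2")]

def Spec_mask_options_py (options : Option (List (String × String))) (out : Option (List (String × String))) : Prop := out = mask_options_py_alt options
instance (options : Option (List (String × String))) (out : Option (List (String × String))) : Decidable (Spec_mask_options_py options out) := by unfold Spec_mask_options_py; infer_instance

-- ===== CLAIM (what is proved, stated in full; the proofs are below) =====
def Claim_equal_mask_options_py : Prop := ∀ (options : Option (List (String × String))), Dom_mask_options_py options → Pre_mask_options_py options → Spec_mask_options_py options (mask_options_py options)

-- ===== LEMMAS AND PROOFS =====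

def pvMaskWith (ks : List String) (p : String × String) : String × String :=
  (p.1, if p.1 ∈ ks ∧ p.2 ≠ "" then "********" else p.2)

lemma pvStep_keys_nodup (d : PySem.Dict String String) (k : String) (h : d.keys.Nodup) :
    (pvMaskStep d k).keys.Nodup := by
  unfold pvMaskStep
  cases hg : d.get? k with
  | none => simpa using h
  | some v =>
    by_cases hv : v = ""
    · simp [hv, h]
    · simpa [hv] using PySem.Dict.nodup_keys_insert d k "********" h

-- A's sensitive-key loop, run on a dict with distinct keys, masks its items pointwise
lemma pvFoldl_items (ks : List String) (d : PySem.Dict String String)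
    (hk : ks.Nodup) (hd : d.keys.Nodup) :
    (ks.foldl pvMaskStep d).items = d.items.map (pvMaskWith ks) := by
  induction ks generalizing d with
  | nil =>
    rw [List.foldl_nil]
    nth_rewrite 1 [← List.map_id d.items]
    symm
    apply List.map_congr_left
    intro p _
    simp [pvMaskWith]
  | cons k ks ih =>
    have hknotin : k ∉ ks := (List.nodup_cons.mp hk).1
    have hks : ks.Nodup := (List.nodup_cons.mp hk).2
    have hstep := ih (pvMaskStep d k) hks (pvStep_keys_nodup d k hd)
    rw [List.foldl_cons, hstep]
    unfold pvMaskStep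
    cases hg : d.get? k with
    | none =>
      apply List.map_congr_left
      intro p hp
      have hne : p.1 ≠ k := by
        intro hpk
        have := PySem.Dict.mem_keys_of_mem_items d hp
        rw [hpk] at this
        rw [PySem.Dict.get?_eq_none_iff_not_mem_keys] at hg
        exact hg this
      simp [pvMaskWith, hne]
    | some v =>
      by_cases hv : v = ""
      · subst hv
        simp only [ne_eq, not_true_eq_false, if_false]
        apply List.map_congr_left
        intro p hp
        by_cases hpk : p.1 = k
        · have : p.2 = "" := by
            have hpv : d.get? p.1 = some p.2 := by
              rcases p with ⟨a, b⟩
              exact PySem.Dict.get?_of_mem_items d hp hd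
            rw [hpk, hg] at hpv
            exact (Option.some.inj hpv).symm
          simp [pvMaskWith, this]
        · simp [pvMaskWith, hpk]
      · have hcont : d.contains k := by
          rw [PySem.Dict.contains_eq_isSome_get?, hg]; rfl
        simp only [hv, ne_eq, not_false_iff, if_true]
        rw [PySem.Dict.items_insert_of_contains d _ hcont, List.map_map]
        apply List.map_congr_left
        intro p hp
        by_cases hpk : p.1 = k
        · have hpv : p.2 = v := by
            have : d.get? p.1 = some p.2 := by
              rcases p with ⟨a, b⟩
              exact PySem.Dict.get?_of_mem_items d hp hd
            rw [hpk, hg] at this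
            exact (Option.some.inj this).symm
          simp [Function.comp, pvMaskWith, hpk, hpv, hv, hknotin,
            show ("********" : String) ≠ "" from by decide]
        · simp [Function.comp, pvMaskWith, hpk]

-- ===== VERDICT (by name: the statement is the Claim_ definition above) =====
theorem mask_options_py_spec : Claim_equal_mask_options_py := by
  intro options _ hpre
  unfold Spec_mask_options_py mask_options_py mask_options_py_alt
  cases options with
  | none => rfl
  | some l =>
    have hnd : (l.map Prod.fst).Nodup := hpre
    by_cases hl : l.isEmpty
    · simp [hl]
    · simp only [hl, Bool.false_eq_true, if_false, Option.some.injEq]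
      rw [pvFoldl_items pvSensKeys (PySem.Dict.mk l) (by decide) (by simpa [PySem.Dict.keys] using hnd)]
      rw [PySem.Dict.items_foldl_insert_fresh
        (k := Prod.fst)
        (v := fun p => if p.1 ∈ pvSensKeys ∧ p.2 ≠ "" then "********" else p.2)
        (l := l) (d := PySem.Dict.empty)
        (by intro a _; simp [PySem.Dict.contains_empty]) hnd]
      show List.map (pvMaskWith pvSensKeys) l = PySem.Dict.empty.items ++ _
      simp [pvMaskWith, PySem.Dict.empty, PySem.Dict.items]
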